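-- pv_equiv track=rewrite | github.com/Godron629/random | code/kth_largest_value_sorted.py | kth_largest_value_sorted
-- ===== SOURCE A (Python) =====
-- def kth_largest_value_sorted(ls: list, k: int) -> int:
--     """
--     Return the kth largest value in a list that we sort
--     """
--     if k < 1:
--         raise Exception("K cannot be less than 1")
--
--     if not ls:
--         raise Exception("List cannot be empty")
--
--     new_list = []
--
--     # Get rid of repeat values
--     for i in ls:
--         if i not in new_list:
--             new_list.append(i)
--
--     new_list.sort()
--
--     if k > len(new_list):
--         # There is no kth value in the list
--         return None
--
--     return new_list[k - 1]
-- ===== SOURCE B (Python) =====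
-- def kth_largest_value_sorted(ls: list, k: int) -> int:
--     if k < 1:
--         raise Exception("K cannot be less than 1")
--     if not ls:
--         raise Exception("List cannot be empty")
--     s = sorted(ls)
--     count = 0
--     prev = None
--     for x in s:
--         if count == 0 or x != prev:
--             count += 1
--             prev = x
--             if count == k:
--                 return x
--     return None
-- ===== Notes on version B (the rewrite author's own statement) =====
-- stated objective: faster
-- what changed: Replaces the quadratic membership-scan dedup plus sort-then-index with sorting a copy once and a single adjacency-dedup pass that returns the kth distinct value early.
import Mathlib
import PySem

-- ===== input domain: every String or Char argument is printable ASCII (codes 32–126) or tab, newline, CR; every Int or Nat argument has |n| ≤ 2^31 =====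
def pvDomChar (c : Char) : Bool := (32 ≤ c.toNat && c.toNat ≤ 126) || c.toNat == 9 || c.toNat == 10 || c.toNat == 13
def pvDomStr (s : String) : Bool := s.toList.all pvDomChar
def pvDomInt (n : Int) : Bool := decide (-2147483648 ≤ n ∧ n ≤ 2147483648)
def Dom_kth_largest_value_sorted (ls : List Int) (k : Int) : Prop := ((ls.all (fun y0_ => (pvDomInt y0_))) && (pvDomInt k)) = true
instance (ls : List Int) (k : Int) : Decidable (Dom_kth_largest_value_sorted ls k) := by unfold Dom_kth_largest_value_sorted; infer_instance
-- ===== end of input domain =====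

-- B sorts a copy once and returns the kth distinct value in one adjacency-dedup pass,
-- instead of A's quadratic membership-scan dedup followed by sort and index; A mutates only its local list, so no caller-visible side effects.

-- ===== PORT A =====
-- for i in ls: if i not in new_list: new_list.append(i)
def pvNewList (ls : List Int) : List Int :=
  ls.foldl (fun acc i => if i ∈ acc then acc else acc ++ [i]) []

def kth_largest_value_sorted (ls : List Int) (k : Int) : Option Int :=
  if k < 1 then none          -- Python raises Exception here; excluded by Pre_
  else if ls = [] then none   -- Python raises Exception here; excluded by Pre_
  else if k > ((PySem.List.sorted (pvNewList ls) (fun x => x) false).length : Int) then none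
  else PySem.List.pyGet? (PySem.List.sorted (pvNewList ls) (fun x => x) false) (k - 1)

-- ===== PORT B =====
-- the for-loop over the sorted list, carrying (prev, count)
def pvAltGo (k : Int) : List Int → Option Int → Int → Option Int
  | [], _, _ => none
  | x :: rest, prev, count =>
      if count == 0 || prev != some x then
        if count + 1 == k then some x else pvAltGo k rest (some x) (count + 1)
      else pvAltGo k rest prev count

def kth_largest_value_sorted_alt (ls : List Int) (k : Int) : Option Int :=
  if k < 1 then none          -- Python raises Exception here; excluded by Pre_
  else if ls = [] then none   -- Python raises Exception here; excluded by Pre_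
  else pvAltGo k (PySem.List.sorted ls (fun x => x) false) none 0

-- ===== PRECONDITION & SPEC =====
-- Pre_ excludes exactly the inputs where BOTH Pythons raise Exception: k < 1 or an empty list.
def Pre_kth_largest_value_sorted (ls : List Int) (k : Int) : Prop := 1 ≤ k ∧ ls ≠ []
instance (ls : List Int) (k : Int) : Decidable (Pre_kth_largest_value_sorted ls k) := by unfold Pre_kth_largest_value_sorted; infer_instance
def pvWitness_kth_largest_value_sorted : List Int × Int := ([3, 1, 2, 1], 2)

def Spec_kth_largest_value_sorted (ls : List Int) (k : Int) (out : Option Int) : Prop := out = kth_largest_value_sorted_alt ls k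
instance (ls : List Int) (k : Int) (out : Option Int) : Decidable (Spec_kth_largest_value_sorted ls k out) := by unfold Spec_kth_largest_value_sorted; infer_instance

-- ===== CLAIM (what is proved, stated in full; the proofs are below) =====
def Claim_equal_kth_largest_value_sorted : Prop := ∀ (ls : List Int) (k : Int), Dom_kth_largest_value_sorted ls k → Pre_kth_largest_value_sorted ls k → Spec_kth_largest_value_sorted ls k (kth_largest_value_sorted ls k)

-- ===== LEMMAS AND PROOFS =====

-- proof-only helper: adjacent dedup with a "previous kept value" accumulator
def pvDdj : Option Int → List Int → List Int
  | _, [] => []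
  | prev, x :: rest => if prev = some x then pvDdj prev rest else x :: pvDdj (some x) rest

-- pvAltGo scans pvDdj, counting: its result is the (k-c-1)th element of pvDdj prev s
lemma pvAltGo_eq (k : Int) : ∀ (s : List Int) (prev : Option Int) (c : Int),
    0 ≤ c → c < k → (c = 0 → prev = none) →
    pvAltGo k s prev c = (pvDdj prev s)[(k - c - 1).toNat]? := by
  intro s
  induction s with
  | nil => intro prev c _ _ _; simp [pvAltGo, pvDdj]
  | cons x rest ih =>
    intro prev c hc0 hck h0
    by_cases hpx : prev = some x
    · -- skipped element; prev = some x forces c ≠ 0 (since c = 0 → prev = none)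
      have hc : c ≠ 0 := fun h => by simp [h0 h] at hpx
      have hcond : (c == 0 || prev != some x) = false := by
        simp [hc, hpx]
      unfold pvAltGo pvDdj
      rw [hcond, if_neg (by simp), if_pos hpx]
      exact ih prev c hc0 hck (fun h => absurd h hc)
    · have hcond : (c == 0 || prev != some x) = true := by
        simp [hpx]
      unfold pvAltGo pvDdj
      rw [hcond, if_pos rfl, if_neg hpx]
      by_cases hk : c + 1 = k
      · rw [if_pos (by simpa using hk)]
        have : (k - c - 1).toNat = 0 := by omega
        rw [this]
        simp
      · rw [if_neg (by simpa using hk)]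
        rw [ih (some x) (c + 1) (by omega) (by omega) (fun h => absurd h (by omega))]
        have hι : (k - c - 1).toNat = (k - (c + 1) - 1).toNat + 1 := by omega
        rw [hι]
        simp

-- on a ≤-sorted list with p a lower bound, pvDdj (some p) keeps exactly the elements ≠ p, strictly increasing
lemma pvDdj_some_spec : ∀ (s : List Int), s.Pairwise (· ≤ ·) → ∀ (p : Int), (∀ y ∈ s, p ≤ y) →
    (∀ x, x ∈ pvDdj (some p) s ↔ x ∈ s ∧ x ≠ p) ∧ (∀ y ∈ pvDdj (some p) s, p < y) ∧
      (pvDdj (some p) s).Pairwise (· < ·) := by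
  intro s
  induction s with
  | nil => intro _ p _; simp [pvDdj]
  | cons x rest ih =>
    intro hs p hp
    have hx_le : ∀ y ∈ rest, x ≤ y := (List.pairwise_cons.mp hs).1
    have hrest : rest.Pairwise (· ≤ ·) := (List.pairwise_cons.mp hs).2
    have hpx : p ≤ x := hp x (List.mem_cons_self)
    by_cases he : p = x
    · subst he
      have := ih hrest p (fun y hy => hx_le y hy)
      unfold pvDdj
      rw [if_pos rfl]
      refine ⟨fun z => ?_, this.2.1, this.2.2⟩
      rw [(this.1 z)]
      constructor
      · rintro ⟨hz, hzp⟩; exact ⟨List.mem_cons_of_mem _ hz, hzp⟩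
      · rintro ⟨hz, hzp⟩
        rcases List.mem_cons.mp hz with h | h
        · exact absurd h hzp
        · exact ⟨h, hzp⟩
    · have hplt : p < x := lt_of_le_of_ne hpx he
      have := ih hrest x hx_le
      unfold pvDdj
      rw [if_neg (fun h : some p = some x => he (Option.some.inj h))]
      refine ⟨fun z => ?_, ?_, ?_⟩
      · constructor
        · intro hz
          rcases List.mem_cons.mp hz with h | h
          · subst h; exact ⟨List.mem_cons_self, fun h => he h.symm⟩
          · have := (this.1 z).mp h
            refine ⟨List.mem_cons_of_mem _ this.1, ?_⟩
            have hxz : x ≤ z := hx_le z this.1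
            omega
        · rintro ⟨hz, hzp⟩
          rcases List.mem_cons.mp hz with h | h
          · subst h; exact List.mem_cons_self
          · by_cases hzx : z = x
            · subst hzx; exact List.mem_cons_self
            · exact List.mem_cons_of_mem _ ((this.1 z).mpr ⟨h, hzx⟩)
      · intro y hy
        rcases List.mem_cons.mp hy with h | h
        · omega
        · exact lt_trans hplt (this.2.1 y h)
      · exact List.pairwise_cons.mpr ⟨this.2.1, this.2.2⟩

lemma pvDdj_none_spec (s : List Int) (hs : s.Pairwise (· ≤ ·)) :
    (∀ x, x ∈ pvDdj none s ↔ x ∈ s) ∧ (pvDdj none s).Pairwise (· < ·) := by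
  cases s with
  | nil => simp [pvDdj]
  | cons x rest =>
    have hx_le : ∀ y ∈ rest, x ≤ y := (List.pairwise_cons.mp hs).1
    have hrest : rest.Pairwise (· ≤ ·) := (List.pairwise_cons.mp hs).2
    have h := pvDdj_some_spec rest hrest x hx_le
    simp only [pvDdj, reduceCtorEq, if_false]
    constructor
    · intro z
      constructor
      · intro hz
        rcases List.mem_cons.mp hz with h' | h'
        · subst h'; exact List.mem_cons_self
        · exact List.mem_cons_of_mem _ ((h.1 z).mp h').1
      · intro hz
        rcases List.mem_cons.mp hz with h' | h'
        · subst h'; exact List.mem_cons_self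
        · by_cases hzx : z = x
          · subst hzx; exact List.mem_cons_self
          · exact List.mem_cons_of_mem _ ((h.1 z).mpr ⟨h', hzx⟩)
    · exact List.pairwise_cons.mpr ⟨h.2.1, h.2.2⟩

-- A's first-occurrence dedup loop: nodup, same membership as acc ++ ls
lemma pvFoldDedup_spec : ∀ (ls acc : List Int), acc.Nodup →
    (ls.foldl (fun acc i => if i ∈ acc then acc else acc ++ [i]) acc).Nodup ∧
    (∀ x, x ∈ ls.foldl (fun acc i => if i ∈ acc then acc else acc ++ [i]) acc ↔ x ∈ acc ∨ x ∈ ls) := by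
  intro ls
  induction ls with
  | nil => intro acc h; simpa using h
  | cons i rest ih =>
    intro acc hacc
    simp only [List.foldl_cons]
    by_cases hi : i ∈ acc
    · simp only [if_pos hi]
      have := ih acc hacc
      refine ⟨this.1, fun x => ?_⟩
      rw [this.2 x]
      constructor
      · rintro (h | h)
        · exact Or.inl h
        · exact Or.inr (List.mem_cons_of_mem _ h)
      · rintro (h | h)
        · exact Or.inl h
        · rcases List.mem_cons.mp h with h' | h'
          · subst h'; exact Or.inl hi
          · exact Or.inr h'
    · simp only [if_neg hi]
      have hnd : (acc ++ [i]).Nodup := by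
        refine hacc.append (List.nodup_singleton i) ?_
        intro a ha hb
        rcases List.mem_singleton.mp hb with rfl
        exact hi ha
      have := ih (acc ++ [i]) hnd
      refine ⟨this.1, fun x => ?_⟩
      rw [this.2 x]
      simp only [List.mem_append, List.mem_cons]
      tauto

theorem pv_main (ls : List Int) (k : Int) (hk : 1 ≤ k) (hne : ls ≠ []) :
    kth_largest_value_sorted ls k = kth_largest_value_sorted_alt ls k := by
  unfold kth_largest_value_sorted kth_largest_value_sorted_alt
  rw [if_neg (show ¬ k < 1 by omega), if_neg (show ¬ k < 1 by omega), if_neg hne, if_neg hne]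
  set sA := PySem.List.sorted (pvNewList ls) (fun x => x) false with hsA
  set sB := PySem.List.sorted ls (fun x => x) false with hsB
  -- the two deduplicated sorted lists coincide
  have hfold : (pvNewList ls).Nodup ∧ (∀ x, x ∈ pvNewList ls ↔ x ∈ ([] : List Int) ∨ x ∈ ls) :=
    pvFoldDedup_spec ls [] List.nodup_nil
  have hBpair : sB.Pairwise (· ≤ ·) := PySem.List.sorted_pairwise ls (fun x => x)
  have hBspec := pvDdj_none_spec sB hBpair
  have hmemB : ∀ x, x ∈ pvDdj none sB ↔ x ∈ ls := by
    intro x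
    rw [hBspec.1 x, hsB, PySem.List.mem_sorted]
  have hperm : (pvDdj none sB).Perm (pvNewList ls) := by
    rw [List.perm_ext_iff_of_nodup (hBspec.2.imp (fun h => ne_of_lt h)) hfold.1]
    intro x
    rw [hmemB x, hfold.2 x]
    simp
  have hEq : sA = pvDdj none sB :=
    PySem.List.sorted_eq_of_perm_of_pairwise_lt _ _ (fun x => x) hperm hBspec.2
  -- B's scan is indexing into pvDdj none sB
  have hB : pvAltGo k sB none 0 = (pvDdj none sB)[(k - 0 - 1).toNat]? :=
    pvAltGo_eq k sB none 0 (by omega) (by omega) (fun _ => rfl)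
  rw [hB, ← hEq]
  -- A's guarded index is the same getElem?
  by_cases hlen : k > (sA.length : Int)
  · rw [if_pos hlen]
    symm
    rw [List.getElem?_eq_none_iff]
    omega
  · rw [if_neg hlen]
    have h01 : (0:Int) ≤ k - 1 := by omega
    rw [PySem.List.pyGet?_of_nonneg sA h01]
    congr 1
    omega

-- ===== VERDICT (by name: the statement is the Claim_ definition above) =====
theorem kth_largest_value_sorted_spec : Claim_equal_kth_largest_value_sorted := by
  intro ls k _ hpre
  unfold Spec_kth_largest_value_sorted
  exact pv_main ls k hpre.1 hpre.2
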